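-- pv_equiv track=rewrite | github.com/AnkanMoh/magnetchallenge2 | final.py | _find_BH_keys
-- ===== SOURCE A (Python) =====
-- from typing import Optional, Tuple, List, Dict, Any, Union
--
-- def _find_BH_keys(keys: List[str]) -> Tuple[Optional[str], Optional[str]]:
--     low = {k: k.lower() for k in keys}
--     b_pref = ["b", "b_seq", "bwave", "b_wave", "bfield", "bfield_seq", "b_field"]
--     h_pref = ["h", "h_seq", "hwave", "h_wave", "hfield", "hfield_seq", "h_field"]
--
--     bkey = None
--     hkey = None
--
--     for bp in b_pref:
--         for k in keys:
--             if low[k] == bp: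
--                 bkey = k
--                 break
--         if bkey is not None:
--             break
--
--     for hp in h_pref:
--         for k in keys:
--             if low[k] == hp:
--                 hkey = k
--                 break
--         if hkey is not None:
--             break
--
--     if bkey is None:
--         b_cand = [k for k in keys if ("b" in low[k]) and ("db" not in low[k])]
--         bkey = sorted(b_cand)[0] if b_cand else None
--     if hkey is None:
--         h_cand = [k for k in keys if ("h" in low[k]) and ("dh" not in low[k])]
--         hkey = sorted(h_cand)[0] if h_cand else None
--
--     return bkey, hkey
-- ===== SOURCE B (Python) =====
-- from typing import Optional, Tuple, List
--
-- def _find_BH_keys(keys: List[str]) -> Tuple[Optional[str], Optional[str]]: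
--     b_pref = ["b", "b_seq", "bwave", "b_wave", "bfield", "bfield_seq", "b_field"]
--     h_pref = ["h", "h_seq", "hwave", "h_wave", "hfield", "hfield_seq", "h_field"]
--
--     # one pass: index of first key per lowercase name + running lexicographic
--     # minima of the substring-fallback candidates
--     first = {}
--     bmin = None
--     hmin = None
--     for k in keys:
--         lk = k.lower()
--         if lk not in first:
--             first[lk] = k
--         if "b" in lk and "db" not in lk and (bmin is None or k < bmin):
--             bmin = k
--         if "h" in lk and "dh" not in lk and (hmin is None or k < hmin):
--             hmin = k
--
--     bkey = next((first[p] for p in b_pref if p in first), None)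
--     hkey = next((first[p] for p in h_pref if p in first), None)
--     if bkey is None:
--         bkey = bmin
--     if hkey is None:
--         hkey = hmin
--     return bkey, hkey
-- ===== Notes on version B (the rewrite author's own statement) =====
-- stated objective: faster
-- what changed: A's nested priority rescans over the key list and its sort-based fallback are replaced by ONE pass over keys that builds a first-occurrence dict from lowercase name to key and keeps running lexicographic minima of the fallback candidates; selection is then O(1) dict lookups over the preference lists and the precomputed minima, with no rescans and no sort.
import Mathlib
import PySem

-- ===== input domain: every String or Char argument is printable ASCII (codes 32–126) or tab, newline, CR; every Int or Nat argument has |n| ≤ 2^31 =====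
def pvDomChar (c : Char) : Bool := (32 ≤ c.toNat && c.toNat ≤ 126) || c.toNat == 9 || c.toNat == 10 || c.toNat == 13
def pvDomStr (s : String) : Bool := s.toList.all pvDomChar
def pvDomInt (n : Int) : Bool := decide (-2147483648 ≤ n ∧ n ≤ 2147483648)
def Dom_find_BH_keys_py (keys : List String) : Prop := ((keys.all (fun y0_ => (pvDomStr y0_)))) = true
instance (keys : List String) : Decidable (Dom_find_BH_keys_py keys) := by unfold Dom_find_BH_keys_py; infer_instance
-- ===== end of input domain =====

-- B replaces A's nested priority rescans and sort-based fallback by ONE pass over keys building a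
-- first-occurrence dict (lowercase name -> key) and running lexicographic minima, then O(1) lookups.

-- ===== PORT A =====
-- low = {k: k.lower() for k in keys}
def pvLowDict (keys : List String) : PySem.Dict String String :=
  keys.foldl (fun d k => d.insert k (PySem.Str.lower k)) PySem.Dict.empty

-- low[k]; every k looked up comes from keys, so it is present and the "" default is unreachable
def pvLowGet (low : PySem.Dict String String) (k : String) : String := low.getD k ""

-- the nested loop: for bp in pref: for k in keys: if low[k] == bp: …; break — with both breaks
def pvPrefScan (low : PySem.Dict String String) (keys : List String) : List String → Option String
  | [] => none
  | bp :: rest =>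
    match keys.find? (fun k => pvLowGet low k == bp) with
    | some k => some k
    | none => pvPrefScan low keys rest

-- [k for k in keys if c in low[k] and dc not in low[k]]; sorted(cand)[0] if cand else None
def pvFallbackA (low : PySem.Dict String String) (keys : List String) (c dc : String) : Option String :=
  let cand := keys.filter (fun k => PySem.Str.isIn c (pvLowGet low k) && !PySem.Str.isIn dc (pvLowGet low k))
  if cand.isEmpty then none else PySem.List.pyGet? (PySem.List.sorted cand (fun x => x) false) 0

def find_BH_keys_py (keys : List String) : Option String × Option String :=
  let low := pvLowDict keys
  let b_pref := ["b", "b_seq", "bwave", "b_wave", "bfield", "bfield_seq", "b_field"]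
  let h_pref := ["h", "h_seq", "hwave", "h_wave", "hfield", "hfield_seq", "h_field"]
  let bkey := pvPrefScan low keys b_pref
  let hkey := pvPrefScan low keys h_pref
  let bkey := match bkey with
    | some k => some k
    | none => pvFallbackA low keys "b" "db"
  let hkey := match hkey with
    | some k => some k
    | none => pvFallbackA low keys "h" "dh"
  (bkey, hkey)

-- ===== PORT B =====
-- if lk not in first: first[lk] = k
def pvFirstStep (d : PySem.Dict String String) (k : String) : PySem.Dict String String :=
  let lk := PySem.Str.lower k
  if d.contains lk then d else d.insert lk k

-- if c in lk and dc not in lk and (acc is None or k < acc): acc = k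
def pvMinStep (c dc : String) (acc : Option String) (k : String) : Option String :=
  if (PySem.Str.isIn c (PySem.Str.lower k) && !PySem.Str.isIn dc (PySem.Str.lower k)) &&
      (match acc with | none => true | some m => decide (k < m)) then some k else acc

-- the single for-loop over keys, carrying (first, bmin, hmin)
def pvScanLoop (keys : List String) :
    PySem.Dict String String × Option String × Option String :=
  keys.foldl (fun st k =>
      (pvFirstStep st.1 k, pvMinStep "b" "db" st.2.1 k, pvMinStep "h" "dh" st.2.2 k))
    (PySem.Dict.empty, none, none)

-- next((first[p] for p in pref if p in first), None)
def pvLookupPref (first : PySem.Dict String String) : List String → Option String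
  | [] => none
  | p :: ps =>
    match first.get? p with
    | some k => some k
    | none => pvLookupPref first ps

def find_BH_keys_py_alt (keys : List String) : Option String × Option String :=
  let b_pref := ["b", "b_seq", "bwave", "b_wave", "bfield", "bfield_seq", "b_field"]
  let h_pref := ["h", "h_seq", "hwave", "h_wave", "hfield", "hfield_seq", "h_field"]
  let st := pvScanLoop keys
  let bkey := match pvLookupPref st.1 b_pref with
    | some k => some k
    | none => st.2.1
  let hkey := match pvLookupPref st.1 h_pref with
    | some k => some k
    | none => st.2.2
  (bkey, hkey)

-- ===== PRECONDITION & SPEC =====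
def Spec_find_BH_keys_py (keys : List String) (out : Option String × Option String) : Prop := out = find_BH_keys_py_alt keys
instance (keys : List String) (out : Option String × Option String) : Decidable (Spec_find_BH_keys_py keys out) := by unfold Spec_find_BH_keys_py; infer_instance

-- ===== CLAIM (what is proved, stated in full; the proofs are below) =====
def Claim_equal_find_BH_keys_py : Prop := ∀ (keys : List String), Dom_find_BH_keys_py keys → Spec_find_BH_keys_py keys (find_BH_keys_py keys)

-- ===== LEMMAS AND PROOFS =====

-- the lowercase dict of A looks up k.lower() for k ∈ keys
theorem pvLowDict_getD (l : List String) (d : PySem.Dict String String) (k : String) :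
    (l.foldl (fun d k => d.insert k (PySem.Str.lower k)) d).getD k "" =
      if k ∈ l then PySem.Str.lower k else d.getD k "" := by
  induction l generalizing d with
  | nil => simp
  | cons x xs ih =>
    simp only [List.foldl_cons, ih, PySem.Dict.getD_insert, List.mem_cons]
    by_cases hx : k ∈ xs <;> by_cases he : k = x <;> simp [hx, he]

theorem pvLowGet_eq (keys : List String) (k : String) (hk : k ∈ keys) :
    pvLowGet (pvLowDict keys) k = PySem.Str.lower k := by
  simp [pvLowGet, pvLowDict, pvLowDict_getD, hk]

-- find? only cares about predicate values on members
theorem pvFind?_congr {α : Type} (l : List α) (p q : α → Bool) (h : ∀ x ∈ l, p x = q x) :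
    l.find? p = l.find? q := by
  induction l with
  | nil => rfl
  | cons x xs ih =>
    simp only [List.find?_cons]
    rw [h x (by simp)]
    cases q x <;> simp [ih (fun y hy => h y (by simp [hy]))]

-- a fold with three independently-updated components splits into three folds
theorem pvFoldProd {α β γ δ : Type} (f : α → δ → α) (g : β → δ → β) (h : γ → δ → γ)
    (l : List δ) (a : α) (b : β) (c : γ) :
    l.foldl (fun st k => (f st.1 k, g st.2.1 k, h st.2.2 k)) (a, b, c) =
      (l.foldl f a, l.foldl g b, l.foldl h c) := by
  induction l generalizing a b c with
  | nil => rfl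
  | cons x xs ih => simpa using ih (f a x) (g b x) (h c x)

-- the first-occurrence dict answers with the FIRST key of each lowercase name
theorem pvFirstFold_get? (l : List String) (d : PySem.Dict String String) (p : String) :
    (l.foldl pvFirstStep d).get? p =
      match d.get? p with
      | some v => some v
      | none => l.find? (fun k => PySem.Str.lower k == p) := by
  induction l generalizing d with
  | nil => cases hd : d.get? p <;> simp [hd]
  | cons x xs ih =>
    rw [List.foldl_cons, ih]
    by_cases hc : d.contains (PySem.Str.lower x) = true
    · have hstep : pvFirstStep d x = d := by simp [pvFirstStep, hc]
      rw [hstep]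
      cases hd : d.get? p with
      | some v => rfl
      | none =>
        have hne : PySem.Str.lower x ≠ p := by
          intro he
          rw [PySem.Dict.contains_eq_isSome_get?, he, hd] at hc
          simp at hc
        simp [hne]
    · have hstep : pvFirstStep d x = d.insert (PySem.Str.lower x) x := by
        simp [pvFirstStep, hc]
      rw [hstep]
      by_cases he : p = PySem.Str.lower x
      · have hd : d.get? p = none := by
          rw [PySem.Dict.contains_eq_isSome_get?, ← he] at hc
          cases hg : d.get? p <;> simp [hg] at hc ⊢
        rw [PySem.Dict.get?_insert, if_pos he, hd]
        simp [he]
      · rw [PySem.Dict.get?_insert, if_neg he]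
        cases hd : d.get? p with
        | some v => rfl
        | none =>
          have : PySem.Str.lower x ≠ p := fun h => he h.symm
          simp [this]

-- B's dict-lookup loop over the preference list = A's nested priority rescan
theorem pvLookup_eq_scan (keys : List String) (pref : List String) :
    pvLookupPref (keys.foldl pvFirstStep PySem.Dict.empty) pref =
      pvPrefScan (pvLowDict keys) keys pref := by
  induction pref with
  | nil => rfl
  | cons p ps ih =>
    rw [pvLookupPref, pvPrefScan, pvFirstFold_get?]
    have hfc : keys.find? (fun k => pvLowGet (pvLowDict keys) k == p) =
        keys.find? (fun k => PySem.Str.lower k == p) :=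
      pvFind?_congr keys _ _ (fun k hk => by rw [pvLowGet_eq keys k hk])
    rw [hfc, PySem.Dict.get?_empty]
    cases keys.find? (fun k => PySem.Str.lower k == p) with
    | some k => rfl
    | none => exact ih

-- min(xs) with no key, as the fold min? performs with key = id
def pvFid (acc : Option String) (x : String) : Option String :=
  match acc with
  | none => some x
  | some m => if x < m then some x else some m

theorem pvMin?_eq_foldl_Fid (xs : List String) :
    PySem.List.min? xs (fun x => x) = xs.foldl pvFid none := by
  rw [PySem.List.min?]
  apply List.foldl_ext
  intro a x hx
  cases a <;> rfl

theorem pvMinStep_eq (c dc : String) (acc : Option String) (x : String) :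
    pvMinStep c dc acc x =
      if (PySem.Str.isIn c (PySem.Str.lower x) && !PySem.Str.isIn dc (PySem.Str.lower x))
      then pvFid acc x else acc := by
  unfold pvMinStep pvFid
  generalize (PySem.Str.isIn c (PySem.Str.lower x) && !PySem.Str.isIn dc (PySem.Str.lower x)) = P
  cases acc <;> cases P <;> simp

-- B's guarded running minimum = the min? fold over the filtered candidates
theorem pvMinFold_eq_filter (c dc : String) (l : List String) (acc : Option String) :
    l.foldl (pvMinStep c dc) acc =
      (l.filter (fun k => PySem.Str.isIn c (PySem.Str.lower k) &&
        !PySem.Str.isIn dc (PySem.Str.lower k))).foldl pvFid acc := by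
  induction l generalizing acc with
  | nil => rfl
  | cons x xs ih =>
    rw [List.foldl_cons, List.filter_cons]
    by_cases hp : (PySem.Str.isIn c (PySem.Str.lower x) &&
        !PySem.Str.isIn dc (PySem.Str.lower x)) = true
    · rw [if_pos hp, List.foldl_cons, pvMinStep_eq, if_pos hp]
      exact ih (pvFid acc x)
    · rw [if_neg hp, pvMinStep_eq, if_neg hp]
      exact ih acc

-- sorted(cand)[0] = min(cand) for a nonempty list of strings
theorem pvSortedHead_eq_min? (cand : List String) (hne : cand ≠ []) :
    PySem.List.pyGet? (PySem.List.sorted cand (fun x => x) false) 0 =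
      PySem.List.min? cand (fun x => x) := by
  cases hs : PySem.List.sorted cand (fun x => x) false with
  | nil => exact absurd ((PySem.List.sorted_eq_nil_iff cand (fun x => x) false).mp hs) hne
  | cons m t =>
    cases hm : PySem.List.min? cand (fun x => x) with
    | none => exact absurd ((PySem.List.min?_eq_none_iff cand (fun x => x)).mp hm) hne
    | some m' =>
      have hmem : m ∈ cand := by
        rw [← PySem.List.mem_sorted (key := fun x => x) (rev := false), hs]
        exact List.mem_cons_self
      have h1 : m ≤ m' := PySem.List.key_head_sorted_le cand (fun x => x) hs m' (PySem.List.min?_mem hm)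
      have h2 : m' ≤ m := PySem.List.min?_isMin hm m hmem
      rw [PySem.List.pyGet?_zero_cons, le_antisymm h1 h2]

-- A's sort-based fallback = B's running minimum
theorem pvFallback_eq_minFold (keys : List String) (c dc : String) :
    pvFallbackA (pvLowDict keys) keys c dc = keys.foldl (pvMinStep c dc) none := by
  have hcand : keys.filter (fun k => PySem.Str.isIn c (pvLowGet (pvLowDict keys) k) &&
        !PySem.Str.isIn dc (pvLowGet (pvLowDict keys) k)) =
      keys.filter (fun k => PySem.Str.isIn c (PySem.Str.lower k) &&
        !PySem.Str.isIn dc (PySem.Str.lower k)) :=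
    List.filter_congr (fun k hk => by rw [pvLowGet_eq keys k hk])
  rw [pvMinFold_eq_filter, ← pvMin?_eq_foldl_Fid, pvFallbackA, hcand]
  by_cases hfe : (keys.filter (fun k => PySem.Str.isIn c (PySem.Str.lower k) &&
      !PySem.Str.isIn dc (PySem.Str.lower k))).isEmpty
  · rw [if_pos hfe, (PySem.List.min?_eq_none_iff _ _).mpr (List.isEmpty_iff.mp hfe)]
  · rw [if_neg hfe]
    exact pvSortedHead_eq_min? _ (by simpa [List.isEmpty_iff] using hfe)

-- ===== VERDICT (by name: the statement is the Claim_ definition above) =====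
theorem find_BH_keys_py_spec : Claim_equal_find_BH_keys_py := by
  intro keys _
  unfold Spec_find_BH_keys_py find_BH_keys_py find_BH_keys_py_alt pvScanLoop
  rw [pvFoldProd]
  simp only [pvLookup_eq_scan, pvFallback_eq_minFold]
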